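-- pv_equiv track=rewrite | github.com/emacsway/ascetic | autumn/contrib/versioning.py | _split_delta_by_fields
-- ===== SOURCE A (Python) =====
-- def _split_delta_by_fields(txt):
--     """Returns dictionary object, key is fieldname, value is it's diff"""
--     result = {}
--     current = None
--     lines = txt.split("\n")
--     # FIXME: prevent injection of field markers
--     for line in lines:
--         if line[:4] == "--- ":
--             continue
--         if line[:4] == "+++ ":
--             line = line[4:].strip()
--             result[line] = current = []
--             continue
--         if current is not None:
--             current.append(line)
--     for k, v in result.items():
--         result[k] = "\n".join(v)
--     return result
-- ===== SOURCE B (Python) =====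
-- def _split_delta_by_fields(txt):
--     """Returns dictionary object, key is fieldname, value is it's diff"""
--     lines = [l for l in txt.split("\n") if l[:4] != "--- "]
--     marks = [i for i, l in enumerate(lines) if l[:4] == "+++ "]
--     result = {}
--     for i, end in zip(marks, marks[1:] + [len(lines)]):
--         result[lines[i][4:].strip()] = "\n".join(lines[i + 1:end])
--     return result
-- ===== Notes on version B (the rewrite author's own statement) =====
-- stated objective: alternative
-- what changed: A's single streaming state machine (a 'current' list aliased into the dict, appended line by line) is replaced by a cleaned-line list, a pass collecting the field-marker line indices, and a slicing/joining pass over consecutive marker pairs.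
import Mathlib
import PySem

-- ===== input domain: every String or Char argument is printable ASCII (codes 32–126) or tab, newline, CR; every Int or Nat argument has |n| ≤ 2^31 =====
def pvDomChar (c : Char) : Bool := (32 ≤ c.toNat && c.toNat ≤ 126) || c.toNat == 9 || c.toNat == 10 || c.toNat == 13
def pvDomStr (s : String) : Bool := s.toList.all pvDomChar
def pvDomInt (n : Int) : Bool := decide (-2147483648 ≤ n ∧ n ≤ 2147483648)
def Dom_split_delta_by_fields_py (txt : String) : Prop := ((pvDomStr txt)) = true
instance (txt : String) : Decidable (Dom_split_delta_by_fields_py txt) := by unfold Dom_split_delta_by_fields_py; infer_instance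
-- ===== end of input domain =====

-- B replaces A's one-pass streaming state machine (current-list aliasing into the dict) by a
-- marker-index pass plus slicing; same values, no speed claim (objective: alternative).

-- shared line tests: both Pythons compare line[:4] with the markers and take line[4:].strip()
def pvIsRm (l : String) : Bool := PySem.Str.slice l none (some 4) == "--- "
def pvIsAdd (l : String) : Bool := PySem.Str.slice l none (some 4) == "+++ "
def pvName (l : String) : String := PySem.Str.strip (PySem.Str.slice l (some 4) none)

-- ===== PORT A =====
-- loop body of A: the '--- ' skip, then the '+++ ' branch, then the append-to-current branch
def pvStepInner (st : PySem.Dict String (List String) × Option String) (line : String) :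
    PySem.Dict String (List String) × Option String :=
  if pvIsAdd line then
    (st.1.insert (pvName line) [], some (pvName line))
  else
    match st.2 with
    | some k => (st.1.modify k [] (fun v => v ++ [line]), some k)
    | none => st

def pvStepA (st : PySem.Dict String (List String) × Option String) (line : String) :
    PySem.Dict String (List String) × Option String :=
  if pvIsRm line then st else pvStepInner st line

def split_delta_by_fields_py (txt : String) : List (String × String) :=
  let lines := (PySem.Str.split? txt "\n").getD []   -- txt.split("\n"); sep ≠ "" so split? is some
  let r := (lines.foldl pvStepA (PySem.Dict.empty, none)).1
  -- final loop: for k, v in result.items(): result[k] = "\n".join(v)  (re-joins every value in place)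
  r.items.map (fun p => (p.1, PySem.Str.join "\n" p.2))

-- ===== PORT B =====
def pvStepB (lines : List String) (d : PySem.Dict String String) (p : Int × Int) :
    PySem.Dict String String :=
  d.insert (pvName (PySem.List.pyGetD lines p.1 ""))
    (PySem.Str.join "\n" (PySem.List.slice lines (some (p.1 + 1)) (some p.2)))

def split_delta_by_fields_py_alt (txt : String) : List (String × String) :=
  let lines := ((PySem.Str.split? txt "\n").getD []).filter (fun l => !pvIsRm l)
  let marks := (PySem.List.enumerate lines).filterMap
    (fun p => if pvIsAdd p.2 then some p.1 else none)
  ((marks.zip (PySem.List.slice marks (some 1) none ++ [PySem.List.len lines])).foldl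
      (pvStepB lines) PySem.Dict.empty).items

-- ===== PRECONDITION & SPEC =====
def Spec_split_delta_by_fields_py (txt : String) (out : List (String × String)) : Prop := out = split_delta_by_fields_py_alt txt
instance (txt : String) (out : List (String × String)) : Decidable (Spec_split_delta_by_fields_py txt out) := by unfold Spec_split_delta_by_fields_py; infer_instance

-- ===== CLAIM (what is proved, stated in full; the proofs are below) =====
def Claim_equal_split_delta_by_fields_py : Prop := ∀ (txt : String), Dom_split_delta_by_fields_py txt → Spec_split_delta_by_fields_py txt (split_delta_by_fields_py txt)

-- ===== LEMMAS AND PROOFS =====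

-- recursive restatement of A's fold (after the '--- ' lines are gone)
def pvProc (d : PySem.Dict String (List String)) (s : Option String) :
    List String → PySem.Dict String (List String)
  | [] => d
  | l :: t =>
    if pvIsAdd l then pvProc (d.insert (pvName l) []) (some (pvName l)) t
    else
      match s with
      | some k => pvProc (d.modify k [] (fun v => v ++ [l])) (some k) t
      | none => pvProc d none t

-- recursive restatement of B's marker/slice construction
def pvQ (l : String) : Bool := !pvIsAdd l

def pvBSpec (e : PySem.Dict String String) : List String → PySem.Dict String String
  | [] => e
  | l :: t =>
    if pvIsAdd l then
      pvBSpec (e.insert (pvName l) (PySem.Str.join "\n" (t.takeWhile pvQ))) t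
    else pvBSpec e t

def pvMarks (L : List String) (s : Int) : List Int :=
  (PySem.List.enumerate L s).filterMap (fun p => if pvIsAdd p.2 then some p.1 else none)

def pvRel (d : PySem.Dict String (List String)) (e : PySem.Dict String String) : Prop :=
  e.items = d.items.map (fun p => (p.1, PySem.Str.join "\n" p.2))

theorem pvFoldA_filter (L : List String) (st : PySem.Dict String (List String) × Option String) :
    L.foldl pvStepA st = (L.filter (fun l => !pvIsRm l)).foldl pvStepInner st := by
  induction L generalizing st with
  | nil => rfl
  | cons l t ih =>
    by_cases h : pvIsRm l
    · simp [List.foldl_cons, pvStepA, h, ih]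
    · simp [List.foldl_cons, pvStepA, h, ih]

theorem pvFoldInner_eq_proc (L : List String) (d : PySem.Dict String (List String))
    (s : Option String) : (L.foldl pvStepInner (d, s)).1 = pvProc d s L := by
  induction L generalizing d s with
  | nil => rfl
  | cons l t ih =>
    by_cases h : pvIsAdd l
    · simp [List.foldl_cons, pvStepInner, h, pvProc, ih]
    · cases s with
      | some k => simp [List.foldl_cons, pvStepInner, h, pvProc, ih]
      | none => simp [List.foldl_cons, pvStepInner, h, pvProc, ih]

theorem pvModify_insert (d : PySem.Dict String (List String)) (k : String) (v : List String)
    (f : List String → List String) (d0 : List String) :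
    (d.insert k v).modify k d0 f = d.insert k (f v) := by
  simp [PySem.Dict.modify, PySem.Dict.getD_insert_self d k v d0,
    PySem.Dict.insert_insert_self]

theorem pvBlock (t : List String) (d : PySem.Dict String (List String)) (n : String)
    (acc : List String) :
    pvProc (d.insert n acc) (some n) t
      = pvProc (d.insert n (acc ++ t.takeWhile pvQ)) none (t.dropWhile pvQ) := by
  induction t generalizing d acc with
  | nil => simp [pvProc]
  | cons l t ih =>
    by_cases h : pvIsAdd l
    · simp [pvProc, h, pvQ]
    · rw [List.takeWhile_cons_of_pos (by simp [pvQ, h]),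
        List.dropWhile_cons_of_pos (by simp [pvQ, h])]
      rw [pvProc]
      simp only [h, if_false, Bool.false_eq_true]
      rw [pvModify_insert, ih]
      simp

theorem pvBSpec_dropWhile (t : List String) (e : PySem.Dict String String) :
    pvBSpec e t = pvBSpec e (t.dropWhile pvQ) := by
  induction t generalizing e with
  | nil => rfl
  | cons l t ih =>
    by_cases h : pvIsAdd l
    · rw [List.dropWhile_cons_of_neg (by simp [pvQ, h])]
    · rw [List.dropWhile_cons_of_pos (by simp [pvQ, h]), pvBSpec]
      simp only [h, if_false, Bool.false_eq_true]
      exact ih e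

theorem pvRel_insert {d : PySem.Dict String (List String)} {e : PySem.Dict String String}
    (h : pvRel d e) (k : String) (blk : List String) :
    pvRel (d.insert k blk) (e.insert k (PySem.Str.join "\n" blk)) := by
  have h' : e.items = d.items.map (fun p => (p.1, PySem.Str.join "\n" p.2)) := h
  have hkeys : e.keys = d.keys := by
    simp only [PySem.Dict.keys, h', List.map_map]
    exact List.map_congr_left (fun p _ => rfl)
  have hc : e.contains k = d.contains k := by
    simp [PySem.Dict.contains_eq_decide_mem_keys, hkeys]
  by_cases hk : d.contains k = true
  · unfold pvRel
    rw [PySem.Dict.items_insert_of_contains _ _ (hc.trans hk),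
      PySem.Dict.items_insert_of_contains _ _ hk, h', List.map_map, List.map_map]
    apply List.map_congr_left
    intro p _
    by_cases hp : p.1 == k
    · simp [Function.comp, hp]
    · simp [Function.comp, hp]
  · unfold pvRel
    rw [PySem.Dict.items_insert_of_not_contains _ _ (by simp [hc, hk]),
      PySem.Dict.items_insert_of_not_contains _ _ (by simp [hk]), h']
    simp

theorem pvMainA (n : Nat) : ∀ (L : List String), L.length ≤ n →
    ∀ (d : PySem.Dict String (List String)) (e : PySem.Dict String String),
    pvRel d e → pvRel (pvProc d none L) (pvBSpec e L) := by
  induction n with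
  | zero =>
    intro L hL d e h
    cases L with
    | nil => simpa [pvProc, pvBSpec]
    | cons l t => simp at hL
  | succ n ih =>
    intro L hL d e h
    cases L with
    | nil => simpa [pvProc, pvBSpec]
    | cons l t =>
      by_cases ha : pvIsAdd l
      · rw [pvProc, pvBSpec]
        simp only [ha, if_true]
        rw [pvBlock, pvBSpec_dropWhile]
        simp only [List.nil_append]
        exact ih _ (le_trans (List.length_dropWhile_le _ _) (by simpa using hL)) _ _
          (pvRel_insert h _ _)
      · rw [pvProc, pvBSpec]
        simp only [ha, if_false, Bool.false_eq_true]
        exact ih _ (by simpa using hL) _ _ h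

theorem pvMarks_nil_iff (L : List String) (s : Int) :
    (pvMarks L s = [] ↔ L.dropWhile pvQ = [])
      ∧ (L.dropWhile pvQ ≠ [] → (pvMarks L s).head? = some (s + (L.takeWhile pvQ).length)) := by
  induction L generalizing s with
  | nil => simp [pvMarks, PySem.List.enumerate]
  | cons l t ih =>
    by_cases h : pvIsAdd l
    · constructor
      · rw [List.dropWhile_cons_of_neg (by simp [pvQ, h])]
        simp [pvMarks, PySem.List.enumerate_cons, h]
      · intro _
        rw [List.takeWhile_cons_of_neg (by simp [pvQ, h])]
        simp [pvMarks, PySem.List.enumerate_cons, h]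
    · rw [List.dropWhile_cons_of_pos (by simp [pvQ, h]),
        List.takeWhile_cons_of_pos (by simp [pvQ, h])]
      have hm : pvMarks (l :: t) s = pvMarks t (s + 1) := by
        simp [pvMarks, PySem.List.enumerate_cons, h]
      constructor
      · rw [hm]; exact (ih (s + 1)).1
      · intro hne
        rw [hm, (ih (s + 1)).2 hne]
        congr 1
        simp only [List.length_cons]
        push_cast
        ring

theorem pvMainB : ∀ (L pre : List String) (e : PySem.Dict String String),
    ((pvMarks L pre.length).zip ((pvMarks L pre.length).tail ++ [((pre ++ L).length : Int)])).foldl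
        (pvStepB (pre ++ L)) e = pvBSpec e L := by
  intro L
  induction L with
  | nil => intro pre e; simp [pvMarks, PySem.List.enumerate, pvBSpec]
  | cons l t ih =>
    intro pre e
    have hlines : pre ++ l :: t = (pre ++ [l]) ++ t := by simp
    have hcast : ((pre.length : Int) + 1) = (((pre ++ [l]).length : Nat) : Int) := by
      simp
    by_cases h : pvIsAdd l
    · have hm : pvMarks (l :: t) pre.length
          = (pre.length : Int) :: pvMarks t ((pre.length : Int) + 1) := by
        simp [pvMarks, PySem.List.enumerate_cons, h]
      have hget : PySem.List.pyGetD (pre ++ l :: t) (pre.length : Int) "" = l := by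
        rw [PySem.List.pyGetD_natCast]
        simp [List.getD_eq_getElem?_getD]
      rw [pvBSpec]
      simp only [h, if_true]
      cases hM : pvMarks t ((pre.length : Int) + 1) with
      | nil =>
        have hdw : t.dropWhile pvQ = [] := by
          rw [← (pvMarks_nil_iff t ((pre.length : Int) + 1)).1]; exact hM
        have htw : t.takeWhile pvQ = t := by
          have := List.takeWhile_append_dropWhile (p := pvQ) (l := t)
          rw [hdw, List.append_nil] at this
          exact this
        have hslice : PySem.List.slice (pre ++ l :: t) (some ((pre.length : Int) + 1))
            (some (((pre ++ l :: t).length : Nat) : Int)) = t := by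
          have hlen : (((pre ++ l :: t).length : Nat) : Int)
              = (((pre.length + 1 : Nat) : Int) + ((t.length : Nat) : Int)) := by
            simp
            ring
          rw [hlen]
          have h1 : ((pre.length : Int) + 1) = (((pre.length + 1 : Nat) : Nat) : Int) := by
            push_cast; ring
          rw [h1, PySem.List.slice_natCast_add]
          have hlen1 : pre.length + 1 = (pre ++ [l]).length := by simp
          rw [hlines, hlen1, List.drop_left, List.take_of_length_le (le_refl _)]
        rw [hm, hM]
        simp only [List.tail_cons, List.nil_append, List.zip_cons_cons, List.zip_nil_left,
          List.foldl_cons, List.foldl_nil]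
        rw [pvBSpec_dropWhile _ _, hdw, pvBSpec]
        unfold pvStepB
        rw [hget, htw, hslice]
      | cons m2 M =>
        have hdw : t.dropWhile pvQ ≠ [] := by
          intro hc
          rw [← (pvMarks_nil_iff t ((pre.length : Int) + 1)).1] at hc
          rw [hM] at hc
          exact List.cons_ne_nil _ _ hc
        have hm2 : m2 = ((pre.length : Int) + 1) + ((t.takeWhile pvQ).length : Int) := by
          have := (pvMarks_nil_iff t ((pre.length : Int) + 1)).2 hdw
          rw [hM] at this
          simpa using this
        have hslice : PySem.List.slice (pre ++ l :: t) (some ((pre.length : Int) + 1))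
            (some m2) = t.takeWhile pvQ := by
          rw [hm2]
          have h1 : (((pre.length : Int) + 1) + ((t.takeWhile pvQ).length : Int))
              = ((((pre.length + 1 : Nat)) : Int) + (((t.takeWhile pvQ).length : Nat) : Int)) := by
            push_cast; ring
          have h2 : ((pre.length : Int) + 1) = (((pre.length + 1 : Nat) : Nat) : Int) := by
            push_cast; ring
          rw [h1, h2, PySem.List.slice_natCast_add]
          have hlen1 : pre.length + 1 = (pre ++ [l]).length := by simp
          rw [hlines, hlen1, List.drop_left]
          exact (List.prefix_iff_eq_take.1 (List.takeWhile_prefix pvQ)).symm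
        rw [hm, hM]
        simp only [List.tail_cons, List.cons_append, List.zip_cons_cons, List.foldl_cons]
        have hstep : pvStepB (pre ++ l :: t) e ((pre.length : Int), m2)
            = e.insert (pvName l) (PySem.Str.join "\n" (t.takeWhile pvQ)) := by
          unfold pvStepB
          rw [hget, hslice]
        rw [hstep]
        have := ih (pre ++ [l]) (e.insert (pvName l) (PySem.Str.join "\n" (t.takeWhile pvQ)))
        rw [← hcast, hM, ← hlines] at this
        simpa using this
    · have hm : pvMarks (l :: t) pre.length = pvMarks t ((pre.length : Int) + 1) := by
        simp [pvMarks, PySem.List.enumerate_cons, h]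
      rw [pvBSpec]
      simp only [h, if_false, Bool.false_eq_true]
      have := ih (pre ++ [l]) e
      rw [← hcast, ← hlines] at this
      rw [hm]
      have hlen2 : ((pre ++ [l]) ++ t).length = (pre ++ l :: t).length := by simp
      simpa [hlen2] using this

-- ===== VERDICT (by name: the statement is the Claim_ definition above) =====
theorem split_delta_by_fields_py_spec : Claim_equal_split_delta_by_fields_py := by
  intro txt _
  unfold Spec_split_delta_by_fields_py
  simp only [split_delta_by_fields_py, split_delta_by_fields_py_alt]
  generalize (PySem.Str.split? txt "\n").getD [] = ls
  rw [pvFoldA_filter, pvFoldInner_eq_proc]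
  set F := ls.filter (fun l => !pvIsRm l) with hF
  have hmB := pvMainB F [] PySem.Dict.empty
  have hrel : pvRel (pvProc PySem.Dict.empty none F) (pvBSpec PySem.Dict.empty F) :=
    pvMainA F.length F le_rfl _ _ rfl
  rw [PySem.List.slice_from_one]
  have hzip : (PySem.List.enumerate F).filterMap
      (fun p => if pvIsAdd p.2 then some p.1 else none) = pvMarks F 0 := rfl
  rw [hzip]
  have hlen : PySem.List.len F = (F.length : Int) := by simp
  have h0 : pvMarks F 0 = pvMarks F (([] : List String).length : Int) := by norm_num
  rw [hlen, h0]
  have hfold : ((pvMarks F (([] : List String).length : Int)).zip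
      ((pvMarks F (([] : List String).length : Int)).tail ++ [(F.length : Int)])).foldl
      (pvStepB F) PySem.Dict.empty = pvBSpec PySem.Dict.empty F := by
    simpa using hmB
  rw [hfold]
  exact hrel.symm
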